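-- pv_equiv track=rewrite | github.com/FedericoBaldi/LeetCode-solutions | Python solutions/1424 diagonal traverse II.py | findDiagonalOrder2
-- ===== SOURCE A (Python) =====
-- from typing import List
--
-- def findDiagonalOrder2(nums: List[List[int]]) -> List[int]:
--     res = []
--     max_row = 0
--     for i in range(len(nums)):
--         max_row = max(max_row, len(nums[i]))
--         for j in range(i, -1, -1):
--             if i - j < len(nums[j]):
--                 res.append(nums[j][i-j])
--
--     for j in range(1, max_row):
--         for i in range(len(nums) -1, -1, -1):
--             if j + len(nums) - 1 - i < len(nums[i]):
--                 res.append(nums[i][j + len(nums) - 1 - i])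
--     return res
-- ===== SOURCE B (Python) =====
-- from typing import List
--
-- def findDiagonalOrder2(nums: List[List[int]]) -> List[int]:
--     # One pass: bucket every element by its diagonal index i + j,
--     # then emit the buckets in order, each reversed (bottom-to-top).
--     buckets = {}
--     for i, row in enumerate(nums):
--         for j, v in enumerate(row):
--             buckets.setdefault(i + j, []).append(v)
--     ndiag = len(nums) + max(map(len, nums), default=0) - 1
--     res = []
--     for d in range(ndiag):
--         res.extend(reversed(buckets.get(d, [])))
--     return res
-- ===== Notes on version B (the rewrite author's own statement) =====
-- stated objective: faster
-- what changed: A walks every diagonal with per-diagonal index scans over all rows (two nested loop families); B makes one pass over the elements bucketing them by diagonal index i+j in a dict, then emits the buckets in order, each reversed.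
import Mathlib
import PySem

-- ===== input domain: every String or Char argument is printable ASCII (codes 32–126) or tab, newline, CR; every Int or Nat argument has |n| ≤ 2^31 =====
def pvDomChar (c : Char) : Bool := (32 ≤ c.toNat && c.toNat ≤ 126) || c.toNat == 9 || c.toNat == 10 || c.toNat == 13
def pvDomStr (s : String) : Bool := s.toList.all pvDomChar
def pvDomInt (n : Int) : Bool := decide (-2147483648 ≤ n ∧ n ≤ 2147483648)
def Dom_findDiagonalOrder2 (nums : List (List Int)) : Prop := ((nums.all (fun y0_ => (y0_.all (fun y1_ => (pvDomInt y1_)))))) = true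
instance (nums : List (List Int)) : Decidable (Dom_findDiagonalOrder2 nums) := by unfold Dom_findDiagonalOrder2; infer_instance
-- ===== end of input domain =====

-- B replaces A's per-diagonal scans with one bucketing pass over the elements (bucket = diagonal
-- index i+j, emitted in order, each bucket reversed); a timing run decides the speed label.

-- ===== PORT A =====
def findDiagonalOrder2 (nums : List (List Int)) : List Int :=
  let st := (PySem.List.pyRange 0 (PySem.List.len nums) 1).foldl
    (fun (st : List Int × Int) i =>
      ((PySem.List.pyRange i (-1) (-1)).foldl
          (fun res j =>
            if i - j < ((PySem.List.pyGetD nums j []).length : Int) then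
              res ++ [PySem.List.pyGetD (PySem.List.pyGetD nums j []) (i - j) 0]
            else res) st.1,
        max st.2 ((PySem.List.pyGetD nums i []).length : Int)))
    ([], 0)
  (PySem.List.pyRange 1 st.2 1).foldl
    (fun res j =>
      (PySem.List.pyRange (PySem.List.len nums - 1) (-1) (-1)).foldl
        (fun res i =>
          if j + PySem.List.len nums - 1 - i < ((PySem.List.pyGetD nums i []).length : Int) then
            res ++ [PySem.List.pyGetD (PySem.List.pyGetD nums i []) (j + PySem.List.len nums - 1 - i) 0]
          else res) res) st.1

-- ===== PORT B =====
def findDiagonalOrder2_alt (nums : List (List Int)) : List Int :=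
  let buckets : PySem.Dict Int (List Int) :=
    (PySem.List.enumerate nums).foldl
      (fun b p => (PySem.List.enumerate p.2).foldl
         (fun b q => b.modify (p.1 + q.1) [] (fun l => l ++ [q.2])) b)
      PySem.Dict.empty
  let ndiag : Int :=
    PySem.List.len nums + PySem.List.maxD (nums.map (fun r => (r.length : Int))) id 0 - 1
  (PySem.List.pyRange 0 ndiag 1).foldl (fun res d => res ++ (buckets.getD d []).reverse) []

-- ===== PRECONDITION & SPEC =====
def Spec_findDiagonalOrder2 (nums : List (List Int)) (out : List Int) : Prop := out = findDiagonalOrder2_alt nums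
instance (nums : List (List Int)) (out : List Int) : Decidable (Spec_findDiagonalOrder2 nums out) := by unfold Spec_findDiagonalOrder2; infer_instance

-- ===== CLAIM (what is proved, stated in full; the proofs are below) =====
def Claim_equal_findDiagonalOrder2 : Prop := ∀ (nums : List (List Int)), Dom_findDiagonalOrder2 nums → Spec_findDiagonalOrder2 nums (findDiagonalOrder2 nums)

-- ===== LEMMAS AND PROOFS =====

-- row r of nums ([] out of range), the element of diagonal d in row r, whether row r meets diagonal d
def pvRow (nums : List (List Int)) (r : Int) : List Int := PySem.List.pyGetD nums r []
def pvHit (nums : List (List Int)) (d r : Int) : Bool :=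
  decide (0 ≤ d - r) && decide (d - r < ((pvRow nums r).length : Int))
def pvCell (nums : List (List Int)) (d r : Int) : Int := PySem.List.pyGetD (pvRow nums r) (d - r) 0
-- diagonal d read top-to-bottom (ascending row index)
def pvDiag (nums : List (List Int)) (d : Int) : List Int :=
  ((PySem.List.pyRange 0 (PySem.List.len nums) 1).filter (fun r => pvHit nums d r)).map
    (fun r => pvCell nums d r)
-- the maximum row length
def pvM (nums : List (List Int)) : Int := nums.foldl (fun m r => max m ((r.length : Int))) 0

theorem pvM_nonneg (nums : List (List Int)) : 0 ≤ pvM nums := by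
  unfold pvM
  rw [← List.foldl_map (f := fun r : List Int => (r.length : Int)) (g := max)]
  exact (PySem.List.le_foldl_max _ 0).1

theorem pvRow_len_le (nums : List (List Int)) (r : Int) :
    ((pvRow nums r).length : Int) ≤ pvM nums := by
  unfold pvRow pvM PySem.List.pyGetD
  rw [← List.foldl_map (f := fun r : List Int => (r.length : Int)) (g := max)]
  cases h : PySem.List.pyGet? nums r with
  | none => simpa using (PySem.List.le_foldl_max (nums.map (fun r : List Int => (r.length : Int))) 0).1
  | some row =>
      have hm : (row.length : Int) ∈ nums.map (fun r : List Int => (r.length : Int)) :=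
        List.mem_map_of_mem (PySem.List.mem_of_pyGet?_eq_some nums h)
      simpa using (PySem.List.le_foldl_max (nums.map (fun r : List Int => (r.length : Int))) 0).2 _ hm

theorem pvMaxAux (t : List Int) : ∀ (a : Int), PySem.List.maxD (a :: t) id 0 = t.foldl max a := by
  induction t with
  | nil => intro a; rfl
  | cons x xs ih =>
      intro a
      have key : PySem.List.maxD (a :: x :: xs) id 0 = PySem.List.maxD (max a x :: xs) id 0 := by
        show (List.foldl _ (if id a < id x then some x else some a) xs).getD 0 = _
        simp only [id_eq]
        rcases lt_or_ge a x with h | h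
        · rw [if_pos h, max_eq_right h.le]; rfl
        · rw [if_neg (not_lt.mpr h), max_eq_left h]; rfl
      rw [key, ih, List.foldl_cons]

theorem pvMaxD_eq (nums : List (List Int)) :
    PySem.List.maxD (nums.map (fun r => (r.length : Int))) id 0 = pvM nums := by
  unfold pvM
  rw [← List.foldl_map (f := fun r : List Int => (r.length : Int)) (g := max)]
  cases hl : nums.map (fun r : List Int => (r.length : Int)) with
  | nil => rfl
  | cons x xs =>
      have hx : 0 ≤ x := by
        have : x ∈ nums.map (fun r : List Int => (r.length : Int)) := by
          rw [hl]; exact List.mem_cons_self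
        obtain ⟨r, -, rfl⟩ := List.mem_map.mp this
        positivity
      rw [pvMaxAux, List.foldl_cons, max_eq_right hx]

theorem pvFlatMap_if (l : List Int) (p : Int → Bool) (f : Int → Int) :
    l.flatMap (fun x => if p x then [f x] else []) = (l.filter p).map f := by
  induction l with
  | nil => rfl
  | cons a t ih => simp only [List.flatMap_cons, List.filter_cons, ih]; by_cases h : p a <;> simp [h]

theorem pvFilter_beq_pyRange (a b x : Int) :
    (PySem.List.pyRange a b 1).filter (fun c => c == x) =
      if a ≤ x ∧ x < b then [x] else [] := by
  rw [List.filter_beq]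
  by_cases h : a ≤ x ∧ x < b
  · rw [List.count_eq_one_of_mem (PySem.List.nodup_pyRange_one a b)
      (PySem.List.mem_pyRange_one.mpr h), if_pos h]
    rfl
  · rw [List.count_eq_zero.mpr (fun hm => h (PySem.List.mem_pyRange_one.mp hm)), if_neg h]
    rfl

-- diagonal chunk of A's first loop (d < R): descending scan = reversed ascending diagonal
theorem pvDiagA1 (nums : List (List Int)) (d : Int) (h0 : 0 ≤ d)
    (hR : d < PySem.List.len nums) :
    ((PySem.List.pyRange d (-1) (-1)).filter
        (fun j => decide (d - j < ((PySem.List.pyGetD nums j []).length : Int)))).map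
      (fun j => PySem.List.pyGetD (PySem.List.pyGetD nums j []) (d - j) 0) =
      (pvDiag nums d).reverse := by
  simp only [PySem.List.len] at hR ⊢
  rw [PySem.List.pyRange_neg_one_eq_reverse, List.filter_reverse, List.map_reverse]
  unfold pvDiag pvHit pvCell pvRow
  simp only [PySem.List.len]
  rw [PySem.List.pyRange_one_append 0 (d+1) (nums.length : Int) (by omega) (by omega),
    List.filter_append]
  have h2 : (PySem.List.pyRange (d+1) (nums.length : Int)).filter
      (fun r => decide (0 ≤ d - r) && decide (d - r < ((PySem.List.pyGetD nums r []).length : Int))) = [] := by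
    apply List.filter_eq_nil_iff.mpr
    intro r hr
    have := PySem.List.mem_pyRange_one.mp hr
    simp only [Bool.and_eq_true, decide_eq_true_eq, not_and]
    omega
  have h1 : (PySem.List.pyRange 0 (d+1)).filter
      (fun r => decide (0 ≤ d - r) && decide (d - r < ((PySem.List.pyGetD nums r []).length : Int))) =
      (PySem.List.pyRange 0 (d+1)).filter
      (fun j => decide (d - j < ((PySem.List.pyGetD nums j []).length : Int))) := by
    apply List.filter_congr
    intro r hr
    have hm := PySem.List.mem_pyRange_one.mp hr
    simp
    omega
  rw [h2, h1]
  norm_num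

-- diagonal chunk of A's second loop (R ≤ d)
theorem pvDiagA2 (nums : List (List Int)) (d : Int) (hR : PySem.List.len nums ≤ d) :
    ((PySem.List.pyRange (PySem.List.len nums - 1) (-1) (-1)).filter
        (fun i => decide (d - i < ((PySem.List.pyGetD nums i []).length : Int)))).map
      (fun i => PySem.List.pyGetD (PySem.List.pyGetD nums i []) (d - i) 0) =
      (pvDiag nums d).reverse := by
  simp only [PySem.List.len] at hR ⊢
  rw [PySem.List.pyRange_neg_one_eq_reverse, List.filter_reverse, List.map_reverse]
  unfold pvDiag pvHit pvCell pvRow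
  simp only [PySem.List.len]
  have h1 : (PySem.List.pyRange 0 (nums.length : Int)).filter
      (fun r => decide (0 ≤ d - r) && decide (d - r < ((PySem.List.pyGetD nums r []).length : Int))) =
      (PySem.List.pyRange 0 (nums.length : Int)).filter
      (fun i => decide (d - i < ((PySem.List.pyGetD nums i []).length : Int))) := by
    apply List.filter_congr
    intro r hr
    have hm := PySem.List.mem_pyRange_one.mp hr
    simp
    omega
  rw [h1]
  norm_num

-- B's bucket for key d is exactly diagonal d read top-to-bottom
theorem pvRowBucket (nums : List (List Int)) (d r : Int) :
    (((PySem.List.enumerate (PySem.List.pyGetD nums r [])).map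
        (fun q => (r + q.1, q.2))).filter (fun pr => pr.1 == d)).map (fun pr => pr.2) =
      if pvHit nums d r then [pvCell nums d r] else [] := by
  rw [PySem.List.enumerate_eq_map_pyRange _ (0 : Int), List.map_map, List.filter_map,
    List.map_map]
  have hp : ((fun pr : Int × Int => pr.1 == d) ∘
      ((fun q : Int × Int => (r + q.1, q.2)) ∘
        (fun c => (c, PySem.List.pyGetD (PySem.List.pyGetD nums r []) c 0)))) =
      fun c => c == d - r := by
    funext c
    simp only [Function.comp]
    by_cases h : c = d - r
    · subst h; simp [show r + (d - r) = d from by omega]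
    · simp [h, show ¬ (r + c = d) from by omega]
  rw [hp, pvFilter_beq_pyRange]
  unfold pvHit pvCell pvRow
  simp only [PySem.List.len]
  by_cases hcond : (0:Int) ≤ d - r ∧ d - r < ((PySem.List.pyGetD nums r []).length : Int)
  · rw [if_pos hcond, if_pos (by simpa using hcond), List.map_cons, List.map_nil]
    simp [Function.comp, show r + (d - r) = d from by omega]
  · rw [if_neg hcond, if_neg (by simpa using hcond), List.map_nil]

theorem pvBucket_eq (nums : List (List Int)) (d : Int) :
    (((PySem.List.enumerate nums).foldl
        (fun b p => (PySem.List.enumerate p.2).foldl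
           (fun b q => b.modify (p.1 + q.1) [] (fun l => l ++ [q.2])) b)
        PySem.Dict.empty).getD d []) = pvDiag nums d := by
  have hstep : ∀ (b : PySem.Dict Int (List Int)) (p : Int × List Int),
      (PySem.List.enumerate p.2).foldl
          (fun b q => b.modify (p.1 + q.1) [] (fun l => l ++ [q.2])) b
        = ((PySem.List.enumerate p.2).map (fun q => (p.1 + q.1, q.2))).foldl
            (fun b pr => b.modify pr.1 [] (fun l => l ++ [pr.2])) b := by
    intro b p; rw [List.foldl_map]
  simp only [hstep]
  rw [← List.foldl_flatMap, PySem.Dict.getD_foldl_modify_append]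
  rw [List.filter_flatMap, List.map_flatMap]
  rw [PySem.List.enumerate_eq_map_pyRange _ ([] : List Int), List.flatMap_map]
  unfold pvDiag
  rw [← pvFlatMap_if]
  simp only [PySem.List.len]
  have hempty : (PySem.Dict.empty : PySem.Dict Int (List Int)).getD d [] = [] := rfl
  rw [hempty, List.nil_append]
  apply List.flatMap_congr
  intro r _
  exact pvRowBucket nums d r

theorem pvA_eq (nums : List (List Int)) :
    findDiagonalOrder2 nums =
      ((PySem.List.pyRange 0 (PySem.List.len nums) 1) ++
        (PySem.List.pyRange (PySem.List.len nums) (PySem.List.len nums + pvM nums - 1) 1)).flatMap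
        (fun d => (pvDiag nums d).reverse) := by
  unfold findDiagonalOrder2
  dsimp only
  rw [PySem.List.foldl_prod_mk
    (f := fun res i => List.foldl (fun res j =>
        if i - j < ((PySem.List.pyGetD nums j []).length : Int) then
          res ++ [PySem.List.pyGetD (PySem.List.pyGetD nums j []) (i - j) 0]
        else res) res (PySem.List.pyRange i (-1) (-1)))
    (g := fun m i => max m ((PySem.List.pyGetD nums i []).length : Int))]
  simp only [PySem.List.foldl_append_ite, PySem.List.foldl_append_eq_flatMap, List.nil_append]
  rw [PySem.List.foldl_pyRange_zero_pyGetD nums [] (fun m row => max m ((row.length : Int))) 0]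
  rw [show nums.foldl (fun m row => max m ((row.length : Int))) 0 = pvM nums from rfl]
  rw [List.flatMap_append]
  congr 1
  · apply List.flatMap_congr
    intro d hd
    have hm := PySem.List.mem_pyRange_one.mp hd
    simp only [PySem.List.len] at hm
    exact pvDiagA1 nums d (by omega) (by simp only [PySem.List.len]; omega)
  · rw [PySem.List.pyRange_one 1 (pvM nums), PySem.List.pyRange_one,
      show PySem.List.len nums + pvM nums - 1 - PySem.List.len nums = pvM nums - 1 from by ring,
      List.flatMap_map, List.flatMap_map]
    apply List.flatMap_congr
    intro k hk
    rw [show (1:Int) + (k:Int) + PySem.List.len nums - 1 = PySem.List.len nums + (k:Int) from by ring]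
    exact pvDiagA2 nums (PySem.List.len nums + (k:Int)) (by simp only [PySem.List.len]; omega)

theorem pvB_eq (nums : List (List Int)) :
    findDiagonalOrder2_alt nums =
      (PySem.List.pyRange 0 (PySem.List.len nums + pvM nums - 1) 1).flatMap
        (fun d => (pvDiag nums d).reverse) := by
  unfold findDiagonalOrder2_alt
  simp only [pvMaxD_eq, pvBucket_eq, PySem.List.foldl_append_eq_flatMap, List.nil_append]

-- ===== VERDICT (by name: the statement is the Claim_ definition above) =====
theorem findDiagonalOrder2_spec : Claim_equal_findDiagonalOrder2 := by
  intro nums _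
  unfold Spec_findDiagonalOrder2
  rw [pvA_eq, pvB_eq]
  rcases lt_or_ge (pvM nums) 1 with hM | hM
  · -- all rows empty: every diagonal is empty
    have hM0 : pvM nums = 0 := le_antisymm (by omega) (pvM_nonneg nums)
    have hdiag : ∀ d : Int, pvDiag nums d = [] := by
      intro d
      unfold pvDiag
      rw [List.filter_eq_nil_iff.mpr, List.map_nil]
      intro r _
      unfold pvHit
      have := pvRow_len_le nums r
      simp only [Bool.and_eq_true, decide_eq_true_eq]
      omega
    have hnil : ∀ (l : List Int), l.flatMap (fun _ => ([] : List Int)) = [] := by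
      intro l; induction l <;> simp_all
    simp [hdiag, hnil]
  · rw [← PySem.List.pyRange_one_append 0 (PySem.List.len nums)
      (PySem.List.len nums + pvM nums - 1) (by simp [PySem.List.len]) (by omega)]
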